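-- pv_equiv track=rewrite | github.com/management-spec/context-recon-mcp | src/tools/relevant_code.py | _normalize_excerpt_for_response
-- ===== SOURCE A (Python) =====
-- def _normalize_excerpt_for_response(text: str) -> str:
--     lines = [line.rstrip() for line in str(text).splitlines()]
--     while lines and not lines[0].strip():
--         lines.pop(0)
--     while lines and not lines[-1].strip():
--         lines.pop()
--
--     collapsed: list[str] = []
--     blank_open = False
--     for line in lines:
--         if not line.strip():
--             if blank_open:
--                 continue
--             blank_open = True
--             collapsed.append("")
--             continue
--         blank_open = False
--         collapsed.append(line)
--     return "\n".join(collapsed)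
-- ===== SOURCE B (Python) =====
-- def _normalize_excerpt_for_response(text: str) -> str:
--     lines = [line.rstrip() for line in str(text).splitlines()]
--     n = len(lines)
--     groups = []
--     i = 0
--     while i < n:
--         if not lines[i]:
--             i += 1
--             continue
--         j = i
--         while j < n and lines[j]:
--             j += 1
--         groups.append("\n".join(lines[i:j]))
--         i = j
--     return "\n\n".join(groups)
-- ===== Notes on version B (the rewrite author's own statement) =====
-- stated objective: simpler
-- what changed: Replaces the pop()-based edge trimming and the stateful blank_open flag loop with an index scan that extracts maximal runs of nonblank lines, joins each run with '\n' and joins the runs with '\n\n' (trimming and blank-collapsing fall out of the grouping for free).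
import Mathlib
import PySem

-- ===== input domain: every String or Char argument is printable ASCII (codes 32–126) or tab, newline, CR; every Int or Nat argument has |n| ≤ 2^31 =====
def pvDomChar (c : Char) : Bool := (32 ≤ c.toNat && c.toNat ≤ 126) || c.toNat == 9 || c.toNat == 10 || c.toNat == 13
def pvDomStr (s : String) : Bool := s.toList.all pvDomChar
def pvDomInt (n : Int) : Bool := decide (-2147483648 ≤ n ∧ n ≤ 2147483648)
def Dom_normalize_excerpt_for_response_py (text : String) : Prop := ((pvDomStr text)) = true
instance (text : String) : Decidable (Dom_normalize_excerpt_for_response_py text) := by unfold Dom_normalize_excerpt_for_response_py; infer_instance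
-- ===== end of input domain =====

-- B replaces A's pop()-based edge trimming and blank_open-flag loop by an index scan that emits
-- maximal runs of nonblank lines and joins the runs with "\n\n" (objective: simpler).

-- ===== PORT A =====
-- while lines and not lines[0].strip(): lines.pop(0)
def pvA_trimLead : List String → List String
  | [] => []
  | l :: rest => if PySem.Str.strip l = "" then pvA_trimLead rest else l :: rest

-- while lines and not lines[-1].strip(): lines.pop()   (fuel = the list length bounds the pops)
def pvA_trimTrail_go : Nat → List String → List String
  | 0, lines => lines
  | fuel + 1, lines =>
      if lines ≠ [] ∧ PySem.Str.strip (lines.getLastD "") = "" then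
        pvA_trimTrail_go fuel lines.dropLast
      else lines

def pvA_trimTrail (lines : List String) : List String := pvA_trimTrail_go lines.length lines

-- the body of the 'for line in lines' loop, state = (collapsed, blank_open)
def pvA_step (st : List String × Bool) (line : String) : List String × Bool :=
  if PySem.Str.strip line = "" then
    if st.2 then st else (st.1 ++ [""], true)
  else (st.1 ++ [line], false)

def normalize_excerpt_for_response_py (text : String) : String :=
  let lines := (PySem.Str.splitlines text).map PySem.Str.rstrip
  let lines := pvA_trimLead lines
  let lines := pvA_trimTrail lines
  PySem.Str.join "\n" (lines.foldl pvA_step ([], false)).1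

-- ===== PORT B =====
-- inner 'while j < n and lines[j]: j += 1'   (fuel = n - j bounds the iterations)
def pvB_scan_go : Nat → List String → Nat → Nat → Nat
  | 0, _, _, j => j
  | fuel + 1, lines, n, j =>
      if j < n ∧ lines.getD j "" ≠ "" then pvB_scan_go fuel lines n (j + 1) else j

def pvB_scan (lines : List String) (n j : Nat) : Nat := pvB_scan_go (n - j) lines n j

-- outer 'while i < n' loop   (fuel = n - i bounds the iterations: i strictly grows)
def pvB_loop_go : Nat → List String → Nat → List String → Nat → List String
  | 0, _, _, groups, _ => groups
  | fuel + 1, lines, n, groups, i =>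
      if i < n then
        if lines.getD i "" = "" then pvB_loop_go fuel lines n groups (i + 1)
        else
          let j := pvB_scan lines n i
          pvB_loop_go fuel lines n
            (groups ++ [PySem.Str.join "\n" (PySem.List.slice lines (some (i : Int)) (some (j : Int)))]) j
      else groups

def pvB_loop (lines : List String) (n : Nat) (groups : List String) (i : Nat) : List String :=
  pvB_loop_go (n - i) lines n groups i

def normalize_excerpt_for_response_py_alt (text : String) : String :=
  let lines := (PySem.Str.splitlines text).map PySem.Str.rstrip
  PySem.Str.join "\n\n" (pvB_loop lines lines.length [] 0)

-- ===== PRECONDITION & SPEC =====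
def Spec_normalize_excerpt_for_response_py (text : String) (out : String) : Prop := out = normalize_excerpt_for_response_py_alt text
instance (text : String) (out : String) : Decidable (Spec_normalize_excerpt_for_response_py text out) := by unfold Spec_normalize_excerpt_for_response_py; infer_instance

-- ===== CLAIM (what is proved, stated in full; the proofs are below) =====
def Claim_equal_normalize_excerpt_for_response_py : Prop := ∀ (text : String), Dom_normalize_excerpt_for_response_py text → Spec_normalize_excerpt_for_response_py text (normalize_excerpt_for_response_py text)

-- ===== LEMMAS AND PROOFS =====

-- blank test as a Bool predicate
def pvBL (l : String) : Bool := decide (l = "")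
def pvNB (l : String) : Bool := decide (l ≠ "")

-- trailing-blank trim, in closed form
def pvTrimR (L : List String) : List String := (L.reverse.dropWhile pvBL).reverse

-- maximal runs of nonblank lines
def pvRG : List String → List (List String)
  | [] => []
  | l :: rest =>
      if l = "" then pvRG rest
      else (l :: rest.takeWhile pvNB) :: pvRG (rest.dropWhile pvNB)
termination_by L => L.length
decreasing_by
  · simp
  · have := List.length_dropWhile_le pvNB rest; simp; omega

-- what A's flag loop computes
def pvCollapse : List String → List String
  | [] => []
  | l :: rest =>
      if l = "" then "" :: pvCollapse (rest.dropWhile pvBL)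
      else l :: pvCollapse rest
termination_by L => L.length
decreasing_by
  · have := List.length_dropWhile_le pvBL rest; simp; omega
  · simp

-- what B's loop computes, as a list function
def pvTG : List String → List String
  | [] => []
  | l :: rest =>
      if l = "" then pvTG rest
      else PySem.Str.join "\n" (l :: rest.takeWhile pvNB) :: pvTG (rest.dropWhile pvNB)
termination_by L => L.length
decreasing_by
  · simp
  · have := List.length_dropWhile_le pvNB rest; simp; omega

theorem pv_dropWhile_idem {α : Type} (p : α → Bool) (l : List α) :
    List.dropWhile p (List.dropWhile p l) = List.dropWhile p l := by
  induction l with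
  | nil => rfl
  | cons a t ih =>
      by_cases h : p a
      · simpa [h] using ih
      · simp [h]

theorem pv_rstrip_fix (s : String) : PySem.Str.rstrip (PySem.Str.rstrip s) = PySem.Str.rstrip s := by
  simp [PySem.Str.rstrip, PySem.Chars.rstrip, pv_dropWhile_idem]

-- for an rstrip-fixed line, blankness by strip() is emptiness
theorem pv_blank_iff (l : String) (h : PySem.Str.rstrip l = l) :
    (PySem.Str.strip l = "" ↔ l = "") := by
  have hfix : PySem.Chars.rstrip l.toList = l.toList := by
    have := congrArg String.toList h
    simpa [PySem.Str.rstrip] using this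
  constructor
  · intro hs
    have hs' : PySem.Chars.strip l.toList = [] := by
      have := congrArg String.toList hs
      simpa [PySem.Str.strip] using this
    have hall : ∀ c ∈ l.toList, PySem.Chars.isspace c = true := by
      have h1 : ∀ c ∈ List.dropWhile PySem.Chars.isspace l.toList, PySem.Chars.isspace c = true := by
        intro c hc
        have : List.dropWhile PySem.Chars.isspace
            (List.dropWhile PySem.Chars.isspace l.toList).reverse = [] := by
          simpa [PySem.Chars.strip, PySem.Chars.rstrip, PySem.Chars.lstrip] using hs'
        exact List.dropWhile_eq_nil_iff.mp this c (List.mem_reverse.mpr hc)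
      intro c hc
      rcases List.mem_append.mp (by
        rw [List.takeWhile_append_dropWhile (p := PySem.Chars.isspace)]; exact hc) with h2 | h2
      · exact List.mem_takeWhile_imp h2
      · exact h1 c h2
    have : PySem.Chars.rstrip l.toList = [] := by
      simp only [PySem.Chars.rstrip, List.reverse_eq_nil_iff]
      exact List.dropWhile_eq_nil_iff.mpr (fun c hc => hall c (List.mem_reverse.mp hc))
    have hnil : l.toList = [] := by rw [← hfix, this]
    cases l; simpa using hnil
  · rintro rfl; decide

theorem pvA_trimLead_eq (L : List String) (hp : ∀ l ∈ L, (PySem.Str.strip l = "" ↔ l = "")) :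
    pvA_trimLead L = L.dropWhile pvBL := by
  induction L with
  | nil => rfl
  | cons l rest ih =>
      have hl := hp l (by simp)
      by_cases h : l = ""
      · subst h
        rw [pvA_trimLead, if_pos (hl.mpr rfl)]
        simp [pvBL, ih (fun x hx => hp x (by simp [hx]))]
      · rw [pvA_trimLead, if_neg (fun hs => h (hl.mp hs))]
        simp [pvBL, h]

theorem pvA_trimTrail_go_eq (fuel : Nat) (L : List String) (hf : L.length ≤ fuel)
    (hp : ∀ l ∈ L, (PySem.Str.strip l = "" ↔ l = "")) :
    pvA_trimTrail_go fuel L = pvTrimR L := by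
  induction fuel generalizing L with
  | zero =>
      have : L = [] := List.eq_nil_of_length_eq_zero (by omega)
      subst this; simp [pvA_trimTrail_go, pvTrimR]
  | succ fuel ih =>
  cases hL : L.reverse with
  | nil =>
      have : L = [] := by simpa using congrArg List.reverse hL
      subst this; simp [pvA_trimTrail_go, pvTrimR]
  | cons a t =>
      have hLeq : L = t.reverse ++ [a] := by
        have := congrArg List.reverse hL; simpa using this
      have hne : L ≠ [] := by subst hLeq; simp
      have hlast : L.getLastD "" = a := by subst hLeq; simp
      have hdl : L.dropLast = t.reverse := by subst hLeq; simp
      have ha : a ∈ L := by subst hLeq; simp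
      have hba := hp a ha
      by_cases h : a = ""
      · rw [pvA_trimTrail_go, if_pos ⟨hne, by rw [hlast, h]; decide⟩, hdl]
        have hlen : t.reverse.length ≤ fuel := by
          have := congrArg List.length hLeq; simp at this hf ⊢; omega
        rw [ih _ hlen (fun x hx => hp x (by subst hLeq; simp [hx]))]
        subst h
        simp [pvTrimR, hL, pvBL]
      · rw [pvA_trimTrail_go, if_neg (by rw [hlast]; rintro ⟨-, hs⟩; exact h (hba.mp hs))]
        have hb : pvBL a = false := by simp [pvBL, h]
        rw [pvTrimR, hL, List.dropWhile_cons_of_neg (by simp [hb]), ← hL, List.reverse_reverse]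

theorem pvA_trimTrail_eq (L : List String) (hp : ∀ l ∈ L, (PySem.Str.strip l = "" ↔ l = "")) :
    pvA_trimTrail L = pvTrimR L :=
  pvA_trimTrail_go_eq L.length L le_rfl hp

theorem pvA_fold_eq (L : List String) (hp : ∀ l ∈ L, (PySem.Str.strip l = "" ↔ l = "")) (acc : List String) :
    (L.foldl pvA_step (acc, false)).1 = acc ++ pvCollapse L ∧
    (L.foldl pvA_step (acc, true)).1 = acc ++ pvCollapse (L.dropWhile pvBL) := by
  induction L generalizing acc with
  | nil => simp [pvCollapse]
  | cons l rest ih =>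
      have hl := hp l (by simp)
      have ih' := ih (fun x hx => hp x (by simp [hx]))
      by_cases h : l = ""
      · subst h
        constructor
        · rw [List.foldl_cons]
          show ((rest.foldl pvA_step (pvA_step (acc, false) "")).1 = _)
          rw [show pvA_step (acc, false) "" = (acc ++ [""], true) by
            simp [pvA_step, hl.mpr rfl]]
          rw [(ih' (acc ++ [""])).2, pvCollapse]
          simp
        · rw [List.foldl_cons]
          show ((rest.foldl pvA_step (pvA_step (acc, true) "")).1 = _)
          rw [show pvA_step (acc, true) "" = (acc, true) by simp [pvA_step, hl.mpr rfl]]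
          rw [(ih' acc).2]
          simp [pvBL]
      · have hstep : ∀ b : Bool, pvA_step (acc, b) l = (acc ++ [l], false) := by
          intro b; rw [pvA_step, if_neg (fun hs => h (hl.mp hs))]
        have hbl : pvBL l = false := by simp [pvBL, h]
        constructor
        · rw [List.foldl_cons]
          show ((rest.foldl pvA_step (pvA_step (acc, false) l)).1 = _)
          rw [hstep false, (ih' (acc ++ [l])).1, pvCollapse]
          simp [h]
        · rw [List.foldl_cons]
          show ((rest.foldl pvA_step (pvA_step (acc, true) l)).1 = _)
          rw [hstep true, (ih' (acc ++ [l])).1]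
          rw [List.dropWhile_cons_of_neg (by simp [hbl]), pvCollapse]
          simp [h]

theorem pvRG_dropWhile (L : List String) : pvRG (L.dropWhile pvBL) = pvRG L := by
  induction L with
  | nil => rfl
  | cons l rest ih =>
      by_cases h : l = ""
      · subst h
        rw [List.dropWhile_cons_of_pos (by simp [pvBL]), ih]
        rw [pvRG, if_pos rfl]
      · rw [List.dropWhile_cons_of_neg (by simp [pvBL, h])]

theorem pv_dropWhile_head {α : Type} (p : α → Bool) (L : List α) (a : α) (t : List α)
    (h : L.dropWhile p = a :: t) : p a = false := by
  induction L with
  | nil => simp at h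
  | cons x xs ih =>
      by_cases hx : p x
      · exact ih (by simpa [List.dropWhile_cons, hx] using h)
      · rw [List.dropWhile_cons_of_neg hx] at h
        cases h; simpa using hx

theorem pv_dropWhile_eq_self {α : Type} (p : α → Bool) (L : List α)
    (h : ∀ x ∈ L, p x = false) : L.dropWhile p = L := by
  cases L with
  | nil => rfl
  | cons a t => exact List.dropWhile_cons_of_neg (by simp [h a (by simp)])

theorem pvCollapse_run (run Z : List String) (h : ∀ x ∈ run, x ≠ "") :
    pvCollapse (run ++ Z) = run ++ pvCollapse Z := by
  induction run with
  | nil => rfl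
  | cons a t ih =>
      rw [List.cons_append, pvCollapse, if_neg (h a (by simp)),
        ih (fun x hx => h x (by simp [hx]))]
      rfl

theorem pvTrimR_cons (m : String) (M : List String) (hm : m ≠ "") :
    pvTrimR (m :: M) = m :: pvTrimR M := by
  unfold pvTrimR
  rw [List.reverse_cons, List.dropWhile_append]
  by_cases h : (M.reverse.dropWhile pvBL).isEmpty
  · rw [if_pos h, List.dropWhile_cons_of_neg (by simp [pvBL, hm])]
    rw [List.isEmpty_iff] at h
    rw [h]
    simp
  · rw [if_neg h]
    simp

theorem pvTrimR_ne_nil (m : String) (M : List String) (hm : m ≠ "") :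
    pvTrimR (m :: M) ≠ [] := by
  rw [pvTrimR_cons m M hm]; simp

theorem pvTrimR_append (X Y : List String) (h : pvTrimR Y ≠ []) :
    pvTrimR (X ++ Y) = X ++ pvTrimR Y := by
  unfold pvTrimR at *
  rw [List.reverse_append, List.dropWhile_append]
  have h' : (Y.reverse.dropWhile pvBL).isEmpty = false := by
    rcases hE : Y.reverse.dropWhile pvBL with _ | _
    · simp [hE] at h
    · simp
  rw [if_neg (by simp [h'])]
  simp

theorem pvCollapse_blanks (blanks Z : List String) (hne : blanks ≠ [])
    (hb : ∀ x ∈ blanks, x = "") (hZ : Z.dropWhile pvBL = Z) :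
    pvCollapse (blanks ++ Z) = "" :: pvCollapse Z := by
  cases blanks with
  | nil => exact absurd rfl hne
  | cons b bs =>
      rw [List.cons_append, pvCollapse, if_pos (hb b (by simp))]
      congr 1
      rw [List.dropWhile_append,
        if_pos (by
          rw [List.dropWhile_eq_nil_iff.mpr (fun x hx => by simp [pvBL, hb x (by simp [hx])])]
          rfl),
        hZ]

theorem pv_intercalate_cons' {α : Type} (sep g : List α) (G : List (List α)) (hG : G ≠ []) :
    List.intercalate sep (g :: G) = g ++ sep ++ List.intercalate sep G := by
  cases G with
  | nil => exact absurd rfl hG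
  | cons h t => simp [List.intercalate]

theorem pvK (L : List String) :
    pvCollapse (pvTrimR (L.dropWhile pvBL)) = List.intercalate [""] (pvRG L) := by
  induction hn : L.length using Nat.strong_induction_on generalizing L with
  | _ n ih =>
  rw [← pvRG_dropWhile L]
  have hMle : (L.dropWhile pvBL).length ≤ L.length := List.length_dropWhile_le _ _
  cases hM : L.dropWhile pvBL with
  | nil => simp [pvTrimR, pvCollapse, pvRG, List.intercalate]
  | cons m mrest =>
      have hm : m ≠ "" := by
        have := pv_dropWhile_head pvBL L m mrest hM
        simpa [pvBL] using this
      have hlenM : (m :: mrest).length ≤ n := by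
        rw [← hM, ← hn]; exact hMle
      rw [pvRG, if_neg hm]
      set run := m :: mrest.takeWhile pvNB with hrun
      set rest2 := mrest.dropWhile pvNB with hrest2
      have hrun_nb : ∀ x ∈ run, x ≠ "" := by
        intro x hx
        rcases List.mem_cons.mp hx with rfl | hx
        · exact hm
        · have := List.mem_takeWhile_imp hx
          simpa [pvNB] using this
      have hsplit : m :: mrest = run ++ rest2 := by
        rw [hrun, hrest2, List.cons_append, List.takeWhile_append_dropWhile]
      have hlen_rest2 : rest2.length ≤ mrest.length := List.length_dropWhile_le _ _
      cases hM' : rest2.dropWhile pvBL with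
      | nil =>
          have hallb : ∀ x ∈ rest2, x = "" := by
            intro x hx
            have := List.dropWhile_eq_nil_iff.mp hM' x hx
            simpa [pvBL] using this
          have htrim : pvTrimR (run ++ rest2) = run := by
            unfold pvTrimR
            rw [List.reverse_append, List.dropWhile_append,
              if_pos (by
                rw [List.dropWhile_eq_nil_iff.mpr
                  (fun x hx => by simp [pvBL, hallb x (List.mem_reverse.mp hx)])]
                rfl),
              pv_dropWhile_eq_self _ _
                (fun x hx => by simp [pvBL, hrun_nb x (List.mem_reverse.mp hx)])]
            simp
          rw [hsplit, htrim, ← pvRG_dropWhile rest2, hM']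
          have hcr : pvCollapse run = run := by
            have := pvCollapse_run run [] hrun_nb
            simpa [pvCollapse] using this
          rw [hcr]
          simp [pvRG, List.intercalate]
      | cons m' m'rest =>
          have hm' : m' ≠ "" := by
            have := pv_dropWhile_head pvBL rest2 m' m'rest hM'
            simpa [pvBL] using this
          set blanks := rest2.takeWhile pvBL with hblanks
          have hblanks_ne : blanks ≠ [] := by
            cases hr : rest2 with
            | nil => rw [hr] at hM'; simp at hM'
            | cons r0 rs =>
                have hnb : pvNB r0 = false :=
                  pv_dropWhile_head pvNB mrest r0 rs (by rw [← hrest2, hr])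
                have hr0 : r0 = "" := by simpa [pvNB] using hnb
                rw [hblanks, hr, List.takeWhile_cons_of_pos (by simp [pvBL, hr0])]
                simp
          have hballb : ∀ x ∈ blanks, x = "" := by
            intro x hx
            have := List.mem_takeWhile_imp hx
            simpa [pvBL] using this
          have hsplit2 : rest2 = blanks ++ (m' :: m'rest) := by
            rw [hblanks, ← hM', List.takeWhile_append_dropWhile]
          have hTrM'ne : pvTrimR (m' :: m'rest) ≠ [] := pvTrimR_ne_nil m' m'rest hm'
          have hTrM'head : pvTrimR (m' :: m'rest) = m' :: pvTrimR m'rest :=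
            pvTrimR_cons m' m'rest hm'
          have hMdw : (m' :: m'rest).dropWhile pvBL = m' :: m'rest :=
            List.dropWhile_cons_of_neg (by simp [pvBL, hm'])
          have hlenM' : (m' :: m'rest).length < n := by
            have h2 := congrArg List.length hsplit2
            simp at h2
            have h3 : 0 < blanks.length := List.length_pos_of_ne_nil hblanks_ne
            simp at hlenM
            simp
            omega
          have hIH : pvCollapse (pvTrimR (m' :: m'rest)) =
              List.intercalate [""] (pvRG (m' :: m'rest)) := by
            have := ih (m' :: m'rest).length hlenM' (m' :: m'rest) rfl
            rwa [hMdw] at this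
          have hRGne : pvRG (m' :: m'rest) ≠ [] := by
            rw [pvRG, if_neg hm']
            simp
          have hRGr2 : pvRG rest2 = pvRG (m' :: m'rest) := by
            rw [← pvRG_dropWhile rest2, hM']
          have h1 : pvTrimR (run ++ rest2) = (run ++ blanks) ++ pvTrimR (m' :: m'rest) := by
            rw [hsplit2, ← List.append_assoc]
            exact pvTrimR_append _ _ hTrM'ne
          rw [hsplit, h1, List.append_assoc, pvCollapse_run run _ hrun_nb,
            pvCollapse_blanks blanks _ hblanks_ne hballb
              (by rw [hTrM'head]; exact List.dropWhile_cons_of_neg (by simp [pvBL, hm'])),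
            hIH, hRGr2,
            pv_intercalate_cons' [""] run (pvRG (m' :: m'rest)) hRGne]
          simp

theorem pvB_scan_go_eq (fuel : Nat) (lines : List String) (j : Nat)
    (hj : j ≤ lines.length) (hf : lines.length - j ≤ fuel) :
    pvB_scan_go fuel lines lines.length j = j + ((lines.drop j).takeWhile pvNB).length := by
  induction fuel generalizing j with
  | zero =>
      have : j = lines.length := by omega
      subst this
      simp [pvB_scan_go]
  | succ fuel ih =>
      rw [pvB_scan_go]
      by_cases h : j < lines.length ∧ lines.getD j "" ≠ ""
      · rw [if_pos h]
        obtain ⟨hj', hnbl⟩ := h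
        have hdrop : lines.drop j = lines[j] :: lines.drop (j + 1) := List.drop_eq_getElem_cons hj'
        have hget : lines.getD j "" = lines[j] := List.getD_eq_getElem lines "" hj'
        rw [ih (j + 1) (by omega) (by omega), hdrop]
        rw [List.takeWhile_cons_of_pos (by simp [pvNB]; rw [← hget]; exact hnbl)]
        simp; omega
      · rw [if_neg h]
        rcases Decidable.em (j < lines.length) with hj' | hj'
        · have hbl : lines.getD j "" = "" := by
            by_contra hc; exact h ⟨hj', hc⟩
          have hdrop : lines.drop j = lines[j] :: lines.drop (j + 1) := List.drop_eq_getElem_cons hj'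
          have hget : lines[j] = "" := by rw [← List.getD_eq_getElem lines "" hj', hbl]
          rw [hdrop, List.takeWhile_cons_of_neg (by simp [pvNB, hget])]
          simp
        · have : j = lines.length := by omega
          subst this
          simp

theorem pvB_scan_eq (lines : List String) (j : Nat) (hj : j ≤ lines.length) :
    pvB_scan lines lines.length j = j + ((lines.drop j).takeWhile pvNB).length :=
  pvB_scan_go_eq (lines.length - j) lines j hj le_rfl

theorem pvB_loop_go_eq (fuel : Nat) (lines : List String) (groups : List String) (i : Nat)
    (hi : i ≤ lines.length) (hf : lines.length - i ≤ fuel) :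
    pvB_loop_go fuel lines lines.length groups i = groups ++ pvTG (lines.drop i) := by
  induction fuel generalizing groups i with
  | zero =>
      have : i = lines.length := by omega
      subst this
      simp [pvB_loop_go, pvTG]
  | succ fuel ih =>
      rw [pvB_loop_go]
      by_cases hi' : i < lines.length
      · rw [if_pos hi']
        have hdrop : lines.drop i = lines[i] :: lines.drop (i + 1) := List.drop_eq_getElem_cons hi'
        by_cases hbl : lines.getD i "" = ""
        · rw [if_pos hbl]
          have hget : lines[i] = "" := by rw [← List.getD_eq_getElem lines "" hi', hbl]
          rw [ih groups (i + 1) (by omega) (by omega), hdrop, pvTG, if_pos hget]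
        · rw [if_neg hbl]
          have hget : lines[i] ≠ "" := by rw [← List.getD_eq_getElem lines "" hi']; exact hbl
          set t := (lines.drop i).takeWhile pvNB with ht
          have htcons : t = lines[i] :: ((lines.drop (i + 1)).takeWhile pvNB) := by
            rw [ht, hdrop, List.takeWhile_cons_of_pos (by simp [pvNB, hget])]
          have hscan : pvB_scan lines lines.length i = i + t.length :=
            pvB_scan_eq lines i (by omega)
          have htle : t.length ≤ (lines.drop i).length :=
            (List.takeWhile_prefix pvNB).length_le
          have hlen : (lines.drop i).length = lines.length - i := by simp
          have hslice : PySem.List.slice lines (some (i : Int)) (some ((i + t.length : Nat) : Int)) = t := by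
            rw [PySem.List.slice_natCast]
            have : lines.drop i = t ++ (lines.drop i).dropWhile pvNB := by
              rw [ht, List.takeWhile_append_dropWhile]
            rw [this]
            simp
          have hdropj : lines.drop (i + t.length) = (lines.drop i).dropWhile pvNB := by
            have h1 : lines.drop (i + t.length) = (lines.drop i).drop t.length := by
              rw [List.drop_drop]
            conv_lhs => rw [h1, show lines.drop i = t ++ (lines.drop i).dropWhile pvNB by
              rw [ht, List.takeWhile_append_dropWhile]]
            simp
          have hdw : (lines.drop i).dropWhile pvNB = (lines.drop (i + 1)).dropWhile pvNB := by
            rw [hdrop, List.dropWhile_cons_of_pos (by simp [pvNB, hget])]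
          have htpos : 1 ≤ t.length := by rw [htcons]; simp
          show pvB_loop_go fuel lines lines.length
              (groups ++ [PySem.Str.join "\n"
                (PySem.List.slice lines (some (i : Int)) (some ((pvB_scan lines lines.length i : Nat) : Int)))])
              (pvB_scan lines lines.length i) = _
          rw [hscan, hslice,
            ih _ (i + t.length) (by omega) (by omega), hdropj, hdw]
          conv_rhs => rw [hdrop, pvTG, if_neg hget]
          rw [htcons]
          simp
      · rw [if_neg hi']
        have : i = lines.length := by omega
        subst this
        simp [pvTG]

theorem pvB_loop_eq (lines : List String) (groups : List String) (i : Nat) (hi : i ≤ lines.length) :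
    pvB_loop lines lines.length groups i = groups ++ pvTG (lines.drop i) :=
  pvB_loop_go_eq (lines.length - i) lines groups i hi le_rfl

theorem pvTG_eq_map (L : List String) : pvTG L = (pvRG L).map (PySem.Str.join "\n") := by
  induction hn : L.length using Nat.strong_induction_on generalizing L with
  | _ n ih =>
  cases L with
  | nil => simp [pvTG, pvRG]
  | cons l rest =>
      subst hn
      by_cases h : l = ""
      · rw [pvTG, if_pos h, pvRG, if_pos h]
        exact ih _ (by simp) rest rfl
      · rw [pvTG, if_neg h, pvRG, if_neg h]
        rw [ih _ (by simp; have := List.length_dropWhile_le pvNB rest; omega) _ rfl]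
        simp

theorem pvRG_ne_nil (L : List String) : ∀ g ∈ pvRG L, g ≠ [] := by
  induction hn : L.length using Nat.strong_induction_on generalizing L with
  | _ n ih =>
  cases L with
  | nil => simp [pvRG]
  | cons l rest =>
      subst hn
      by_cases h : l = ""
      · rw [pvRG, if_pos h]
        exact ih _ (by simp) rest rfl
      · rw [pvRG, if_neg h]
        intro g hg
        rcases List.mem_cons.mp hg with rfl | hg
        · simp
        · exact ih _ (by simp; have := List.length_dropWhile_le pvNB rest; omega) _ rfl g hg

theorem pv_map_intercalate {α β : Type} (f : α → β) (sep : List α) (G : List (List α)) :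
    (List.intercalate sep G).map f = List.intercalate (sep.map f) (G.map (List.map f)) := by
  induction G with
  | nil => simp [List.intercalate]
  | cons g G' ih =>
      cases G' with
      | nil => simp [List.intercalate]
      | cons h t =>
          rw [pv_intercalate_cons' sep g (h :: t) (by simp)]
          conv_rhs => rw [List.map_cons]
          rw [pv_intercalate_cons' (sep.map f) (g.map f) ((h :: t).map (List.map f)) (by simp)]
          simp only [List.map_append]
          rw [ih]

theorem pv_intercalate_ne_nil {α : Type} (sep : List α) (g : List α) (G : List (List α))
    (hg : g ≠ []) : List.intercalate sep (g :: G) ≠ [] := by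
  cases G with
  | nil => simpa [List.intercalate]
  | cons h t =>
      rw [pv_intercalate_cons' sep g (h :: t) (by simp)]
      simp [hg]

theorem pv_intercalate_append {α : Type} (sep : List α) (A B : List (List α))
    (hA : A ≠ []) (hB : B ≠ []) :
    List.intercalate sep (A ++ B) =
      List.intercalate sep A ++ sep ++ List.intercalate sep B := by
  induction A with
  | nil => exact absurd rfl hA
  | cons a A' ih =>
      cases A' with
      | nil =>
          cases B with
          | nil => exact absurd rfl hB
          | cons b t =>
              rw [List.singleton_append, pv_intercalate_cons' sep a (b :: t) (by simp)]
              simp [List.intercalate]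
      | cons a' t' =>
          rw [List.cons_append, pv_intercalate_cons' sep a ((a' :: t') ++ B) (by simp),
            ih (by simp), pv_intercalate_cons' sep a (a' :: t') (by simp)]
          simp

theorem pvJ' (G : List (List (List Char))) (hG : ∀ g ∈ G, g ≠ []) :
    List.intercalate ['\n'] (List.intercalate [[]] G) =
      List.intercalate ['\n', '\n'] (G.map (List.intercalate ['\n'])) := by
  induction G with
  | nil => simp [List.intercalate]
  | cons g G' ih =>
      cases G' with
      | nil => simp [List.intercalate]
      | cons h t =>
          have hicne : List.intercalate [[]] (h :: t) ≠ [] :=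
            pv_intercalate_ne_nil [[]] h t (hG h (by simp))
          rw [pv_intercalate_cons' [[]] g (h :: t) (by simp)]
          rw [List.append_assoc,
            pv_intercalate_append ['\n'] g ([[]] ++ List.intercalate [[]] (h :: t))
              (hG g (by simp))
              (by simp),
            pv_intercalate_append ['\n'] [[]] (List.intercalate [[]] (h :: t)) (by simp) hicne]
          rw [ih (fun x hx => hG x (by simp [hx]))]
          conv_rhs => rw [List.map_cons]
          rw [pv_intercalate_cons' ['\n', '\n'] (List.intercalate ['\n'] g)
              ((h :: t).map (List.intercalate ['\n'])) (by simp)]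
          simp [List.intercalate]

theorem pvJ (G : List (List String)) (hG : ∀ g ∈ G, g ≠ []) :
    PySem.Str.join "\n" (List.intercalate [""] G) =
      PySem.Str.join "\n\n" (G.map (PySem.Str.join "\n")) := by
  have h1 : (List.intercalate [""] G).map String.toList =
      List.intercalate [[]] (G.map (List.map String.toList)) := by
    have := pv_map_intercalate String.toList [""] G
    simpa using this
  have h3 : "\n".toList = ['\n'] := rfl
  have h4 : "\n\n".toList = ['\n', '\n'] := rfl
  have h2 : (G.map (PySem.Str.join "\n")).map String.toList =
      (G.map (List.map String.toList)).map (List.intercalate ['\n']) := by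
    simp only [List.map_map]
    apply List.map_congr_left
    intro g hg
    simp [PySem.Str.join, PySem.Chars.join, Function.comp]
  have key : PySem.Chars.join "\n".toList ((List.intercalate [""] G).map String.toList)
      = PySem.Chars.join "\n\n".toList ((G.map (PySem.Str.join "\n")).map String.toList) := by
    unfold PySem.Chars.join
    rw [h3, h4, h1, h2]
    exact pvJ' (G.map (List.map String.toList)) (by
      intro g hg
      rcases List.mem_map.mp hg with ⟨x, hx, rfl⟩
      exact fun hc => hG x hx (List.map_eq_nil_iff.mp hc))
  exact congrArg String.ofList key

-- ===== VERDICT (by name: the statement is the Claim_ definition above) =====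
theorem normalize_excerpt_for_response_py_spec : Claim_equal_normalize_excerpt_for_response_py := by
  intro text _
  unfold Spec_normalize_excerpt_for_response_py
  show PySem.Str.join "\n"
        ((pvA_trimTrail (pvA_trimLead ((PySem.Str.splitlines text).map PySem.Str.rstrip))).foldl
          pvA_step ([], false)).1
      = PySem.Str.join "\n\n"
        (pvB_loop ((PySem.Str.splitlines text).map PySem.Str.rstrip)
          ((PySem.Str.splitlines text).map PySem.Str.rstrip).length [] 0)
  set L := (PySem.Str.splitlines text).map PySem.Str.rstrip with hL
  have hp : ∀ l ∈ L, (PySem.Str.strip l = "" ↔ l = "") := by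
    intro l hl
    rcases List.mem_map.mp hl with ⟨x, -, rfl⟩
    exact pv_blank_iff _ (pv_rstrip_fix x)
  have hp1 : ∀ l ∈ L.dropWhile pvBL, (PySem.Str.strip l = "" ↔ l = "") :=
    fun l hl => hp l ((List.dropWhile_sublist pvBL).mem hl)
  have hp2 : ∀ l ∈ pvTrimR (L.dropWhile pvBL), (PySem.Str.strip l = "" ↔ l = "") := by
    intro l hl
    apply hp1
    unfold pvTrimR at hl
    rw [List.mem_reverse] at hl
    exact List.mem_reverse.mp ((List.dropWhile_sublist pvBL).mem hl)
  rw [pvA_trimLead_eq L hp, pvA_trimTrail_eq _ hp1, (pvA_fold_eq _ hp2 []).1,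
    List.nil_append, pvK L]
  rw [pvB_loop_eq L [] 0 (by omega), List.drop_zero, List.nil_append, pvTG_eq_map L]
  exact pvJ (pvRG L) (pvRG_ne_nil L)
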